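-- pv_equiv track=rewrite | github.com/Margarita89/AlgorithmsAndDataStructures | Cracking the Coding Interview/1_Arrays/1_5.py | checkDelete
-- ===== SOURCE A (Python) =====
-- def checkDelete(s1, s2):
--     ind1 = 0
--     ind2 = 0
--     # number of deletes in s1
--     delete = 0
--     while ind1 < len(s1) and ind2 < len(s2):
--         if s1[ind1] == s2[ind2]:
--             ind1 += 1
--             ind2 += 1
--         else:
--             delete += 1
--             ind1 += 1
--             if delete > 1:
--                 return False
--     # includes situation when no deletion in s1, but last character remains in s1 when we finish while, so delete it to get s2
--     return True
-- ===== SOURCE B (Python) =====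
-- def checkDelete(s1, s2):
--     # Phase 1: find the first divergence of s1 and s2 (or run off either end).
--     i = 0
--     while i < len(s1) and i < len(s2) and s1[i] == s2[i]:
--         i += 1
--     # Phase 2: verify the shifted alignment s1[i+1+j] == s2[i+j].
--     j = 0
--     while i + 1 + j < len(s1) and i + j < len(s2):
--         if s1[i + 1 + j] != s2[i + j]:
--             return False
--         j += 1
--     return True
-- ===== Notes on version B (the rewrite author's own statement) =====
-- stated objective: alternative
-- what changed: Replaced the single loop with a running delete counter and in-loop early exit by two sequential phases: first locate the divergence point of the common prefix, then verify the shifted suffix alignment.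
import Mathlib
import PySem

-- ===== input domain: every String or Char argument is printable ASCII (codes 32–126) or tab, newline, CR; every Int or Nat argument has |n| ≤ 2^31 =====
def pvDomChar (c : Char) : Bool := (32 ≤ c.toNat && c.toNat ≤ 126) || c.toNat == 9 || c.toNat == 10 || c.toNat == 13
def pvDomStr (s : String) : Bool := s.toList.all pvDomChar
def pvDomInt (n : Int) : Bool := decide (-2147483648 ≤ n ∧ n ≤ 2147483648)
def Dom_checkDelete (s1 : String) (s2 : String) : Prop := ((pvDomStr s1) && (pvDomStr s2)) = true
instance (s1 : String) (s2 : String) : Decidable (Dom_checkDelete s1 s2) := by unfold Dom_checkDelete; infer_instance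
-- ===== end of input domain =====

-- B replaces A's single loop with a delete counter by two sequential phases (find the
-- divergence point, then verify the shifted suffix); same cost, different decomposition.

-- ===== PORT A =====
-- A's while-loop: indices ind1/ind2 and the delete counter, early exit when delete > 1.
def checkDeleteLoop (l1 l2 : List Char) (ind1 ind2 delete : Nat) : Bool :=
  if _h : ind1 < l1.length ∧ ind2 < l2.length then
    if l1[ind1]! = l2[ind2]! then
      checkDeleteLoop l1 l2 (ind1 + 1) (ind2 + 1) delete
    else if delete + 1 > 1 then false
    else checkDeleteLoop l1 l2 (ind1 + 1) ind2 (delete + 1)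
  else true
termination_by l1.length - ind1

def checkDelete (s1 : String) (s2 : String) : Bool :=
  checkDeleteLoop s1.toList s2.toList 0 0 0

-- ===== PORT B =====
-- Phase 1: advance i while both in range and characters agree.
def checkDeletePhase1 (l1 l2 : List Char) (i : Nat) : Nat :=
  if _h : i < l1.length ∧ i < l2.length ∧ l1[i]! = l2[i]! then
    checkDeletePhase1 l1 l2 (i + 1)
  else i
termination_by l1.length - i

-- Phase 2: verify the shifted alignment s1[i+1+j] = s2[i+j].
def checkDeletePhase2 (l1 l2 : List Char) (i j : Nat) : Bool :=
  if _h : i + 1 + j < l1.length ∧ i + j < l2.length then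
    if l1[i + 1 + j]! ≠ l2[i + j]! then false
    else checkDeletePhase2 l1 l2 i (j + 1)
  else true
termination_by l1.length - (i + 1 + j)

def checkDelete_alt (s1 : String) (s2 : String) : Bool :=
  checkDeletePhase2 s1.toList s2.toList (checkDeletePhase1 s1.toList s2.toList 0) 0

-- ===== PRECONDITION & SPEC =====
def Spec_checkDelete (s1 : String) (s2 : String) (out : Bool) : Prop := out = checkDelete_alt s1 s2
instance (s1 : String) (s2 : String) (out : Bool) : Decidable (Spec_checkDelete s1 s2 out) := by unfold Spec_checkDelete; infer_instance

-- ===== CLAIM (what is proved, stated in full; the proofs are below) =====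
def Claim_equal_checkDelete : Prop := ∀ (s1 : String) (s2 : String), Dom_checkDelete s1 s2 → Spec_checkDelete s1 s2 (checkDelete s1 s2)

-- ===== LEMMAS AND PROOFS =====

-- A's loop with delete = 1 at the shifted alignment is exactly phase 2.
theorem loop_eq_phase2 (l1 l2 : List Char) (i j : Nat) :
    checkDeleteLoop l1 l2 (i + 1 + j) (i + j) 1 = checkDeletePhase2 l1 l2 i j := by
  fun_induction checkDeletePhase2 l1 l2 i j with
  | case1 j h hne =>
    rw [checkDeleteLoop]
    rw [dif_pos h, if_neg (by simpa using hne), if_pos (by omega : 1 + 1 > 1)]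
  | case2 j h hne ih =>
    rw [checkDeleteLoop]
    have hne' : l1[i + 1 + j]! = l2[i + j]! := by simpa using hne
    rw [dif_pos h, if_pos hne']
    rw [show i + 1 + j + 1 = i + 1 + (j + 1) by omega, show i + j + 1 = i + (j + 1) by omega]
    exact ih
  | case3 j h =>
    rw [checkDeleteLoop]
    rw [dif_neg h]

-- A's loop with delete = 0 on the diagonal equals B: phase 1 then phase 2.
theorem loop_eq_alt (l1 l2 : List Char) (i : Nat) :
    checkDeleteLoop l1 l2 i i 0 = checkDeletePhase2 l1 l2 (checkDeletePhase1 l1 l2 i) 0 := by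
  fun_induction checkDeletePhase1 l1 l2 i with
  | case1 i h ih =>
    rw [checkDeleteLoop]
    rw [dif_pos (⟨h.1, h.2.1⟩ : _ ∧ _), if_pos h.2.2]
    exact ih
  | case2 i h =>
    rw [checkDeleteLoop]
    by_cases hb : i < l1.length ∧ i < l2.length
    · have hne : ¬ l1[i]! = l2[i]! := fun he => h ⟨hb.1, hb.2, he⟩
      rw [dif_pos hb, if_neg hne, if_neg (by omega : ¬ 0 + 1 > 1)]
      have := loop_eq_phase2 l1 l2 i 0
      simpa using this
    · rw [dif_neg hb, checkDeletePhase2]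
      rw [dif_neg (by omega : ¬ (i + 1 + 0 < l1.length ∧ i + 0 < l2.length))]

-- ===== VERDICT (by name: the statement is the Claim_ definition above) =====
theorem checkDelete_spec : Claim_equal_checkDelete := by
  intro s1 s2 _
  unfold Spec_checkDelete checkDelete checkDelete_alt
  exact loop_eq_alt s1.toList s2.toList 0
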